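-- pv_equiv track=rewrite | github.com/semcod/regres | regres/defscan.py | _count_similarity_levels
-- ===== SOURCE A (Python) =====
-- def _count_similarity_levels(pairs: list) -> tuple[int, int, int]:
--     """Count pairs by similarity thresholds."""
--     identyczne, kopie, podobne = 0, 0, 0
--     for p in pairs:
--         sim = p['similarity']
--         if sim >= 95:
--             identyczne += 1
--         elif sim >= 75:
--             kopie += 1
--         elif sim >= 50:
--             podobne += 1
--     return identyczne, kopie, podobne
-- ===== SOURCE B (Python) =====
-- import bisect
--
--
-- def _count_similarity_levels(pairs: list) -> tuple[int, int, int]: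
--     """Count pairs by similarity thresholds (sort + bisect)."""
--     s = sorted(p['similarity'] for p in pairs)
--     n = len(s)
--     identyczne = n - bisect.bisect_left(s, 95)
--     kopie = (n - bisect.bisect_left(s, 75)) - identyczne
--     podobne = (n - bisect.bisect_left(s, 50)) - identyczne - kopie
--     return identyczne, kopie, podobne
-- ===== Notes on version B (the rewrite author's own statement) =====
-- stated objective: alternative
-- what changed: Replaces the per-element elif bucketing loop with building the similarity list, sorting it, and computing each bucket size from bisect_left insertion indices of the thresholds 95/75/50.
import Mathlib
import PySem

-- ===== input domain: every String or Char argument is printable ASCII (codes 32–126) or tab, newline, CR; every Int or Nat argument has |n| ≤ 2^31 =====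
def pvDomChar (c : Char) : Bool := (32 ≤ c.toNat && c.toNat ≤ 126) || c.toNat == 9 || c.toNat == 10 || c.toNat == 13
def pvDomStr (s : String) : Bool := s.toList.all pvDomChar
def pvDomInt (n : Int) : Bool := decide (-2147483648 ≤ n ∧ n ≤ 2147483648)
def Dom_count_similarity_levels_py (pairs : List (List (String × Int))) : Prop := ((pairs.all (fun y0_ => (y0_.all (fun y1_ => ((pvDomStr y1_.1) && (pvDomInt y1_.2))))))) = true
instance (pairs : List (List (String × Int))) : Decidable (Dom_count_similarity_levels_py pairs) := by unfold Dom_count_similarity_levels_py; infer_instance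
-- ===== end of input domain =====

-- B replaces A's per-element elif bucketing with sort + bisect_left index arithmetic (alternative algorithm).


-- ===== PORT A =====
-- sim = p['similarity'] : first-match lookup; Python raises KeyError if missing (excluded by Pre_),
-- the none branch leaves the accumulator unchanged (never reached inside Pre_).
def cslStep (acc : Int × Int × Int) (p : List (String × Int)) : Int × Int × Int :=
  match (PySem.Dict.mk p).get? "similarity" with
  | none => acc
  | some sim =>
    if sim ≥ 95 then (acc.1 + 1, acc.2.1, acc.2.2)
    else if sim ≥ 75 then (acc.1, acc.2.1 + 1, acc.2.2)
    else if sim ≥ 50 then (acc.1, acc.2.1, acc.2.2 + 1)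
    else acc

def count_similarity_levels_py (pairs : List (List (String × Int))) : Int × Int × Int :=
  pairs.foldl cslStep (0, 0, 0)

-- ===== PORT B =====
-- p['similarity'] as in A: the getD 0 default is only reached outside Pre_ (Python raises KeyError there)
def cslSim (p : List (String × Int)) : Int :=
  ((PySem.Dict.mk p).get? "similarity").getD 0

def count_similarity_levels_py_alt (pairs : List (List (String × Int))) : Int × Int × Int :=
  let s := PySem.List.sorted (pairs.map cslSim) (fun x => x) false
  let n : Int := s.length
  let identyczne : Int := n - PySem.List.bisectLeft s 95
  let kopie : Int := (n - PySem.List.bisectLeft s 75) - identyczne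
  let podobne : Int := (n - PySem.List.bisectLeft s 50) - identyczne - kopie
  (identyczne, kopie, podobne)

-- ===== PRECONDITION & SPEC =====
-- Pre_ excludes exactly the inputs where some pair lacks the 'similarity' key, on which Python A raises KeyError.
def Pre_count_similarity_levels_py (pairs : List (List (String × Int))) : Prop :=
  ∀ p ∈ pairs, (PySem.Dict.mk p).contains "similarity" = true
instance (pairs : List (List (String × Int))) : Decidable (Pre_count_similarity_levels_py pairs) := by
  unfold Pre_count_similarity_levels_py; infer_instance

def pvWitness_count_similarity_levels_py : (List (List (String × Int))) :=
  [[("similarity", 96)], [("similarity", 80)], [("similarity", 60)], [("similarity", 10)]]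

def Spec_count_similarity_levels_py (pairs : List (List (String × Int))) (out : Int × Int × Int) : Prop := out = count_similarity_levels_py_alt pairs
instance (pairs : List (List (String × Int))) (out : Int × Int × Int) : Decidable (Spec_count_similarity_levels_py pairs out) := by unfold Spec_count_similarity_levels_py; infer_instance

-- ===== CLAIM (what is proved, stated in full; the proofs are below) =====
def Claim_equal_count_similarity_levels_py : Prop := ∀ (pairs : List (List (String × Int))), Dom_count_similarity_levels_py pairs → Pre_count_similarity_levels_py pairs → Spec_count_similarity_levels_py pairs (count_similarity_levels_py pairs)

-- ===== LEMMAS AND PROOFS =====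

-- A's step, expressed through the extracted similarity value (the none case extracts 0, which hits no bucket).
lemma cslStep_eq (acc : Int × Int × Int) (p : List (String × Int)) :
    cslStep acc p =
      (if 95 ≤ cslSim p then (acc.1 + 1, acc.2.1, acc.2.2)
       else if 75 ≤ cslSim p then (acc.1, acc.2.1 + 1, acc.2.2)
       else if 50 ≤ cslSim p then (acc.1, acc.2.1, acc.2.2 + 1)
       else acc) := by
  unfold cslStep cslSim
  cases (PySem.Dict.mk p).get? "similarity" with
  | none => simp
  | some sim => rfl

-- A's fold computes the three bucket counts over the extracted similarity list.
lemma foldl_cslStep (pairs : List (List (String × Int))) (a b c : Int) :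
    pairs.foldl cslStep (a, b, c) =
      (a + ((pairs.map cslSim).countP (fun v => decide (95 ≤ v)) : Int),
       b + ((pairs.map cslSim).countP (fun v => decide (75 ≤ v ∧ v < 95)) : Int),
       c + ((pairs.map cslSim).countP (fun v => decide (50 ≤ v ∧ v < 75)) : Int)) := by
  induction pairs generalizing a b c with
  | nil => simp
  | cons p rest ih =>
    simp only [List.foldl_cons, List.map_cons, List.countP_cons, cslStep_eq,
      decide_eq_true_eq]
    split_ifs <;>
      simp only [ih] <;>
      refine Prod.ext ?_ (Prod.ext ?_ ?_) <;> dsimp only <;> omega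

-- bisect_left on a sorted list is the number of elements below the probe.
lemma bisectLeft_eq_countP (s : List Int) (h : s.Pairwise (· ≤ ·)) (x : Int) :
    PySem.List.bisectLeft s x = s.countP (fun a => decide (a < x)) := by
  obtain ⟨hlen, hlt, hge⟩ := PySem.List.bisectLeft_spec s x h
  set i := PySem.List.bisectLeft s x with hi
  have hsplit : s = s.take i ++ s.drop i := (List.take_append_drop i s).symm
  rw [hsplit, List.countP_append]
  have h1 : (s.take i).countP (fun a => decide (a < x)) = i := by
    have : ∀ a ∈ s.take i, (fun a => decide (a < x)) a = true := by
      intro a ha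
      obtain ⟨j, hj, hja⟩ := List.mem_iff_getElem.mp ha
      have hj' : j < i := by rw [List.length_take] at hj; omega
      have := hlt j (lt_of_lt_of_le hj' hlen) hj'
      simp only [List.getElem_take] at hja
      subst hja; simpa using this
    rw [List.countP_eq_length.mpr this, List.length_take]
    omega
  have h2 : (s.drop i).countP (fun a => decide (a < x)) = 0 := by
    rw [List.countP_eq_zero]
    intro a ha
    obtain ⟨j, hj, hja⟩ := List.mem_iff_getElem.mp ha
    have hj' : i + j < s.length := by rw [List.length_drop] at hj; omega
    have := hge (i + j) hj' (Nat.le_add_right i j)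
    simp only [List.getElem_drop] at hja
    subst hja; simpa using this
  omega

-- counting below a higher threshold splits at a lower one
lemma countP_lt_split (l : List Int) (x y : Int) (hxy : x ≤ y) :
    l.countP (fun a => decide (a < y)) =
      l.countP (fun a => decide (a < x)) + l.countP (fun a => decide (x ≤ a ∧ a < y)) := by
  induction l with
  | nil => simp
  | cons a t ih =>
    simp only [List.countP_cons, ih, decide_eq_true_eq]
    split_ifs <;> omega

-- total count splits at a threshold
lemma countP_lt_add_ge (l : List Int) (x : Int) :
    l.countP (fun a => decide (a < x)) + l.countP (fun a => decide (x ≤ a)) = l.length := by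
  induction l with
  | nil => simp
  | cons a t ih =>
    simp only [List.countP_cons, List.length_cons, decide_eq_true_eq]
    split_ifs <;> omega

-- ===== VERDICT (by name: the statement is the Claim_ definition above) =====
theorem count_similarity_levels_py_spec : Claim_equal_count_similarity_levels_py := by
  intro pairs _ _
  unfold Spec_count_similarity_levels_py count_similarity_levels_py count_similarity_levels_py_alt
  rw [foldl_cslStep]
  set sims := pairs.map cslSim with hsims
  set s := PySem.List.sorted sims (fun x => x) false with hs
  have hperm : s.Perm sims := PySem.List.sorted_perm sims (fun x => x) false
  have hsorted : s.Pairwise (· ≤ ·) := by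
    simpa using PySem.List.sorted_pairwise sims (fun x => x)
  have hcount : ∀ q : Int → Bool, s.countP q = sims.countP q := fun q => hperm.countP_eq q
  have hlen : s.length = sims.length := hperm.length_eq
  simp only [zero_add]
  rw [bisectLeft_eq_countP s hsorted 95, bisectLeft_eq_countP s hsorted 75,
      bisectLeft_eq_countP s hsorted 50]
  have e95 := countP_lt_add_ge s 95
  have e75 := countP_lt_add_ge s 75
  have e50 := countP_lt_add_ge s 50
  have s9575 := countP_lt_split s 75 95 (by norm_num)
  have s7550 := countP_lt_split s 50 75 (by norm_num)
  have c95 : s.countP (fun a => decide (95 ≤ a)) = sims.countP (fun v => decide (95 ≤ v)) := hcount _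
  have c75 : s.countP (fun a => decide (75 ≤ a)) = sims.countP (fun v => decide (75 ≤ v)) := hcount _
  have c50 : s.countP (fun a => decide (50 ≤ a)) = sims.countP (fun v => decide (50 ≤ v)) := hcount _
  have m9575 : s.countP (fun a => decide (75 ≤ a ∧ a < 95)) = sims.countP (fun v => decide (75 ≤ v ∧ v < 95)) := hcount _
  have m7550 : s.countP (fun a => decide (50 ≤ a ∧ a < 75)) = sims.countP (fun v => decide (50 ≤ v ∧ v < 75)) := hcount _
  refine Prod.ext ?_ (Prod.ext ?_ ?_) <;> dsimp only <;> omega
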